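-- pv_equiv track=rewrite | github.com/jcolinpatrick/kryptos | scripts/thematic/sculpture_physical/e_s_117_coordinate_keys.py | grid_rotation_perm
-- ===== SOURCE A (Python) =====
-- def grid_rotation_perm(rows, cols, length, rotation=90):
--     """Generate permutation for grid rotation.
--
--     Write text into rows×cols grid (row-major), rotate, read off (row-major).
--     rotation: 90 (CW), 180, 270 (CCW)
--     Returns perm where output[i] = input[perm[i]].
--     """
--     # Build grid positions
--     perm = []
--     if rotation == 90:
--         # After 90° CW rotation: new grid is cols×rows
--         # new[c][rows-1-r] = old[r][c]
--         # Reading new grid row-major: for new_r in range(cols), new_c in range(rows)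
--         # new[new_r][new_c] corresponds to old[rows-1-new_c][new_r]
--         for new_r in range(cols):
--             for new_c in range(rows):
--                 old_r = rows - 1 - new_c
--                 old_c = new_r
--                 old_pos = old_r * cols + old_c
--                 if old_pos < length and len(perm) < length:
--                     perm.append(old_pos)
--     elif rotation == 270:
--         # 270° CW = 90° CCW
--         # new[cols-1-c][r] = old[r][c]
--         for new_r in range(cols):
--             for new_c in range(rows):
--                 old_r = new_c
--                 old_c = cols - 1 - new_r
--                 old_pos = old_r * cols + old_c
--                 if old_pos < length and len(perm) < length:
--                     perm.append(old_pos)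
--     elif rotation == 180:
--         for new_r in range(rows):
--             for new_c in range(cols):
--                 old_r = rows - 1 - new_r
--                 old_c = cols - 1 - new_c
--                 old_pos = old_r * cols + old_c
--                 if old_pos < length and len(perm) < length:
--                     perm.append(old_pos)
--     return perm
-- ===== SOURCE B (Python) =====
-- def grid_rotation_perm(rows, cols, length, rotation=90):
--     """Generate permutation for grid rotation.
--
--     Build an explicit 2D matrix of flat source indices, rotate the matrix
--     with the standard zip/reversal idioms, then read it off row-major.
--     """
--     if rotation not in (90, 180, 270):
--         return []
--     grid = [[r * cols + c for c in range(cols)] for r in range(rows)]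
--     if rotation == 90:
--         rot = [list(t) for t in zip(*grid[::-1])]
--     elif rotation == 180:
--         rot = [row[::-1] for row in grid[::-1]]
--     elif rotation == 270:
--         rot = [list(t) for t in zip(*grid)][::-1]
--     flat = [p for row in rot for p in row]
--     kept = [p for p in flat if p < length]
--     return kept[:length]
-- ===== Notes on version B (the rewrite author's own statement) =====
-- stated objective: idiomatic
-- what changed: Instead of three hand-derived per-rotation index formulas inside nested loops with a stateful length guard, B materialises the grid as an explicit 2D matrix of flat indices, rotates the matrix with the standard zip/reverse idioms (zip(*grid[::-1]) etc.), flattens it row-major, then filters idx<length and truncates with a slice.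
import Mathlib
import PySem

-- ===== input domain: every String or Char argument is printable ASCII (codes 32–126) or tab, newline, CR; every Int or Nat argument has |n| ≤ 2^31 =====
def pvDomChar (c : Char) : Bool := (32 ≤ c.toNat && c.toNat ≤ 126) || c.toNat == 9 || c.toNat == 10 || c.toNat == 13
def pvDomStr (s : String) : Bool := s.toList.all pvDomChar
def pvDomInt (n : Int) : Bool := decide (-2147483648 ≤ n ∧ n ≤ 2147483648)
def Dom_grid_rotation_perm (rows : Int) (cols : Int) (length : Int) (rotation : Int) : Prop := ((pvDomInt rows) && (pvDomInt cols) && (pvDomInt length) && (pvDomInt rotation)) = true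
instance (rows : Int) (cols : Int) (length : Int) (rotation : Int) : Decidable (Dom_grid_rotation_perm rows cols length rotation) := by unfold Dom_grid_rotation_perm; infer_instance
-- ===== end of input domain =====

-- B replaces A's three rotation-specific index formulas inside guarded nested loops
-- by building an explicit 2D matrix of flat indices, rotating it with transpose/reverse
-- primitives (the zip/reverse idioms), flattening, filtering and slicing; objective: idiomatic.


-- ===== PORT A =====
def grid_rotation_perm (rows : Int) (cols : Int) (length : Int) (rotation : Int) : List Int :=
  -- perm = []
  if rotation = 90 then
    (PySem.List.pyRange 0 cols 1).foldl (fun perm new_r =>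
      (PySem.List.pyRange 0 rows 1).foldl (fun perm new_c =>
        let old_r := rows - 1 - new_c
        let old_c := new_r
        let old_pos := old_r * cols + old_c
        if old_pos < length ∧ ((perm.length : Int) < length) then perm ++ [old_pos] else perm)
        perm) []
  else if rotation = 270 then
    (PySem.List.pyRange 0 cols 1).foldl (fun perm new_r =>
      (PySem.List.pyRange 0 rows 1).foldl (fun perm new_c =>
        let old_r := new_c
        let old_c := cols - 1 - new_r
        let old_pos := old_r * cols + old_c
        if old_pos < length ∧ ((perm.length : Int) < length) then perm ++ [old_pos] else perm)
        perm) []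
  else if rotation = 180 then
    (PySem.List.pyRange 0 rows 1).foldl (fun perm new_r =>
      (PySem.List.pyRange 0 cols 1).foldl (fun perm new_c =>
        let old_r := rows - 1 - new_r
        let old_c := cols - 1 - new_c
        let old_pos := old_r * cols + old_c
        if old_pos < length ∧ ((perm.length : Int) < length) then perm ++ [old_pos] else perm)
        perm) []
  else []

-- ===== PORT B =====
-- termination helpers for pvZipStar (cited by its decreasing_by)
theorem pv_tail_sum_le (xss : List (List Int)) :
    ((xss.map List.tail).map List.length).sum ≤ (xss.map List.length).sum := by
  induction xss with
  | nil => simp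
  | cons x rest ih =>
    simp only [List.map_cons, List.sum_cons]
    have hx : x.tail.length ≤ x.length := by simp [List.length_tail]
    omega

theorem pv_tail_sum_lt (xss : List (List Int))
    (h : ¬(xss = [] ∨ xss.any List.isEmpty = true)) :
    ((xss.map List.tail).map List.length).sum < (xss.map List.length).sum := by
  rw [not_or] at h
  obtain ⟨h1, h2⟩ := h
  match xss, h1 with
  | x :: rest, _ =>
    simp only [List.map_cons, List.sum_cons]
    have hx : x ≠ [] := by
      intro hx
      exact h2 (List.any_eq_true.mpr ⟨x, List.mem_cons_self .., by simp [hx]⟩)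
    have hlt : x.tail.length < x.length := by
      cases x with
      | nil => exact absurd rfl hx
      | cons a t => simp
    have := pv_tail_sum_le rest
    omega

-- zip(*xss): repeatedly take all heads while no row is exhausted (Python zip semantics)
def pvZipStar (xss : List (List Int)) : List (List Int) :=
  if h : xss = [] ∨ xss.any List.isEmpty = true then []
  else (xss.map List.headI) :: pvZipStar (xss.map List.tail)
termination_by (xss.map List.length).sum
decreasing_by simpa using pv_tail_sum_lt xss h

-- flat = [p for row in rot for p in row]; kept = [p for p in flat if p < length]; kept[:length]
def pvEmit (length : Int) (rot : List (List Int)) : List Int :=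
  let flat := rot.flatten
  let kept := flat.filter (fun p => decide (p < length))
  PySem.List.slice kept none (some length)

def grid_rotation_perm_alt (rows : Int) (cols : Int) (length : Int) (rotation : Int) : List Int :=
  -- if rotation not in (90, 180, 270): return []
  if rotation = 90 ∨ rotation = 180 ∨ rotation = 270 then
    let grid := (PySem.List.pyRange 0 rows 1).map (fun r =>
      (PySem.List.pyRange 0 cols 1).map (fun c => r * cols + c))
    if rotation = 90 then pvEmit length (pvZipStar grid.reverse)
    else if rotation = 180 then pvEmit length (grid.reverse.map List.reverse)
    else pvEmit length (pvZipStar grid).reverse  -- rotation = 270, the only branch left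
  else []

-- ===== PRECONDITION & SPEC =====
def Spec_grid_rotation_perm (rows : Int) (cols : Int) (length : Int) (rotation : Int) (out : List Int) : Prop := out = grid_rotation_perm_alt rows cols length rotation
instance (rows : Int) (cols : Int) (length : Int) (rotation : Int) (out : List Int) : Decidable (Spec_grid_rotation_perm rows cols length rotation out) := by unfold Spec_grid_rotation_perm; infer_instance

-- ===== CLAIM (what is proved, stated in full; the proofs are below) =====
def Claim_equal_grid_rotation_perm : Prop := ∀ (rows : Int) (cols : Int) (length : Int) (rotation : Int), Dom_grid_rotation_perm rows cols length rotation → Spec_grid_rotation_perm rows cols length rotation (grid_rotation_perm rows cols length rotation)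

-- ===== LEMMAS AND PROOFS =====

-- A's append-if-room fold is "filter then take".
theorem pv_foldl_take_filter (P : Int → Prop) [DecidablePred P] (L : Int) (l : List Int) :
    ∀ acc : List Int,
      l.foldl (fun perm x =>
        if P x ∧ ((perm.length : Int) < L) then perm ++ [x] else perm) acc
      = acc ++ (l.filter (fun x => decide (P x))).take (L.toNat - acc.length) := by
  induction l with
  | nil => intro acc; simp
  | cons x t ih =>
    intro acc
    rw [List.foldl_cons]
    by_cases hp : P x
    · by_cases hlen : ((acc.length : Int) < L)
      · rw [if_pos ⟨hp, hlen⟩, ih, List.filter_cons_of_pos (by simpa using hp)]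
        have h2 : L.toNat - acc.length = (L.toNat - (acc ++ [x]).length) + 1 := by
          simp; omega
        rw [h2, List.take_succ_cons]
        simp
      · rw [if_neg (by rintro ⟨-, hl⟩; exact hlen hl), ih,
          List.filter_cons_of_pos (by simpa using hp)]
        have h0 : L.toNat - acc.length = 0 := by omega
        rw [h0]
        simp
    · rw [if_neg (by rintro ⟨hP, -⟩; exact hp hP), ih,
        List.filter_cons_of_neg (by simpa using hp)]

-- A's nested loops are one fold over the concatenated emission list.
theorem pv_loops_flat (n m L : Int) (pos : Int → Int → Int) :
    (PySem.List.pyRange 0 n 1).foldl (fun perm i =>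
      (PySem.List.pyRange 0 m 1).foldl (fun perm j =>
        if pos i j < L ∧ ((perm.length : Int) < L) then perm ++ [pos i j] else perm)
        perm) []
    = ((PySem.List.pyRange 0 n 1).flatMap (fun i => (PySem.List.pyRange 0 m 1).map (pos i))).foldl
        (fun perm x => if x < L ∧ ((perm.length : Int) < L) then perm ++ [x] else perm) [] := by
  rw [List.flatMap_def, List.foldl_flatten, List.foldl_map]
  simp only [List.foldl_map]

-- The guarded fold over a list of nonnegative indices is B's filter-then-slice.
theorem pv_guarded_slice (L : Int) (flat : List Int) (hpos : ∀ x ∈ flat, 0 ≤ x) :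
    flat.foldl (fun perm x => if x < L ∧ ((perm.length : Int) < L) then perm ++ [x] else perm) []
    = PySem.List.slice (flat.filter (fun p => decide (p < L))) none (some L) := by
  rw [pv_foldl_take_filter (fun x => x < L) L flat []]
  simp only [List.nil_append, List.length_nil, Nat.sub_zero]
  by_cases hL : 0 ≤ L
  · rw [PySem.List.slice_to _ hL]
  · have hkept : flat.filter (fun p => decide (p < L)) = [] := by
      rw [List.filter_eq_nil_iff]
      intro x hx
      have := hpos x hx
      simp
      omega
    rw [hkept]
    have hnil : PySem.List.slice ([] : List Int) none (some L) = [] := by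
      rcases h : PySem.List.slice ([] : List Int) none (some L) with _ | ⟨y, ys⟩
      · rfl
      · have hy : y ∈ PySem.List.slice ([] : List Int) none (some L) := by
          rw [h]; exact List.mem_cons_self ..
        simpa using PySem.List.mem_of_mem_slice _ _ _ hy
    rw [hnil]
    have : L.toNat = 0 := by omega
    simp [this]

-- reversing a map over range reads it back-to-front
theorem pv_reverse_map_range {α : Type} (n : Nat) (g : Nat → α) :
    ((List.range n).map g).reverse = (List.range n).map (fun i => g (n - 1 - i)) := by
  induction n with
  | zero => simp
  | succ n ih =>
    conv_lhs => rw [List.range_succ]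
    conv_rhs => rw [List.range_succ_eq_map]
    simp only [List.map_append, List.map_cons, List.map_nil, List.reverse_append,
      List.reverse_cons, List.reverse_nil, List.nil_append, List.singleton_append,
      List.map_map, Function.comp_def]
    rw [ih]
    simp only [Nat.add_sub_cancel, Nat.sub_zero, List.cons.injEq]
    refine ⟨by trivial, List.map_congr_left fun i hi => ?_⟩
    exact congrArg g (by omega)

-- pvZipStar transposes a rectangular matrix given as maps over ranges
theorem pvZipStar_rect (n : Nat) (hn : n ≠ 0) : ∀ (m : Nat) (f : Nat → Nat → Int),
    pvZipStar ((List.range n).map (fun i => (List.range m).map (f i)))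
      = (List.range m).map (fun j => (List.range n).map (fun i => f i j)) := by
  intro m
  induction m with
  | zero =>
    intro f
    rw [pvZipStar.eq_def]
    have hany : ((List.range n).map (fun i => (List.range 0).map (f i))).any List.isEmpty = true := by
      refine List.any_eq_true.mpr ⟨[], ?_, by simp⟩
      exact List.mem_map.mpr ⟨0, List.mem_range.mpr (Nat.pos_of_ne_zero hn), by simp⟩
    rw [dif_pos (Or.inr hany)]
    simp
  | succ m ih =>
    intro f
    rw [pvZipStar.eq_def]
    have hne : ¬(((List.range n).map (fun i => (List.range (m+1)).map (f i))) = []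
        ∨ ((List.range n).map (fun i => (List.range (m+1)).map (f i))).any List.isEmpty = true) := by
      simp only [not_or]
      refine ⟨by simp [List.range_eq_nil, hn], ?_⟩
      simp [List.any_eq_true, List.isEmpty_iff, List.range_eq_nil]
    rw [dif_neg hne]
    simp only [List.map_map, Function.comp_def]
    conv_rhs => rw [List.range_succ_eq_map]
    conv_lhs => rw [List.range_succ_eq_map]
    simp only [List.map_cons, List.map_map, Function.comp_def, List.headI_cons, List.tail_cons]
    exact congrArg (List.map (fun x => f x 0) (List.range n) :: ·) (ih fun i j => f i j.succ)

-- pyRange 0 n 1 as a plain Nat range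
theorem pv_pyRange0 (n : Int) : PySem.List.pyRange 0 n 1 = (List.range n.toNat).map (fun k : Nat => (k : Int)) := by
  rw [PySem.List.pyRange_one]
  simp

-- the three emission-order lemmas: A's flat emission list = B's rotated matrix flattened
theorem pv_flat90 (rows cols : Int) :
    (PySem.List.pyRange 0 cols 1).flatMap (fun i => (PySem.List.pyRange 0 rows 1).map
        (fun j => (rows - 1 - j) * cols + i))
    = (pvZipStar ((PySem.List.pyRange 0 rows 1).map (fun r =>
        (PySem.List.pyRange 0 cols 1).map (fun c => r * cols + c))).reverse).flatten := by
  simp only [pv_pyRange0, List.map_map, List.flatMap_map, Function.comp_def]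
  by_cases h0 : rows.toNat = 0
  · simp [h0, pvZipStar.eq_def]
  · rw [pv_reverse_map_range rows.toNat
      (fun r => (List.range cols.toNat).map (fun c : Nat => (r : Int) * cols + (c : Int)))]
    rw [pvZipStar_rect rows.toNat h0 cols.toNat
      (fun i c => ((rows.toNat - 1 - i : Nat) : Int) * cols + (c : Int))]
    rw [← List.flatMap_def]
    simp only [List.flatMap_def]
    congr 1
    refine List.map_congr_left fun j hj => List.map_congr_left fun i hi => ?_
    have hi' := List.mem_range.mp hi
    have hc : ((rows.toNat - 1 - i : Nat) : Int) = rows - 1 - (i : Int) := by omega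
    rw [hc]

theorem pv_flat270 (rows cols : Int) :
    (PySem.List.pyRange 0 cols 1).flatMap (fun i => (PySem.List.pyRange 0 rows 1).map
        (fun j => j * cols + (cols - 1 - i)))
    = ((pvZipStar ((PySem.List.pyRange 0 rows 1).map (fun r =>
        (PySem.List.pyRange 0 cols 1).map (fun c => r * cols + c)))).reverse).flatten := by
  simp only [pv_pyRange0, List.map_map, List.flatMap_map, Function.comp_def]
  by_cases h0 : rows.toNat = 0
  · simp [h0, pvZipStar.eq_def]
  · rw [pvZipStar_rect rows.toNat h0 cols.toNat
      (fun r c => (r : Int) * cols + (c : Int))]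
    rw [pv_reverse_map_range cols.toNat
      (fun j => (List.range rows.toNat).map (fun i : Nat => (i : Int) * cols + (j : Int)))]
    simp only [List.flatMap_def]
    congr 1
    refine List.map_congr_left fun j hj => List.map_congr_left fun i hi => ?_
    have hj' := List.mem_range.mp hj
    have hc : ((cols.toNat - 1 - j : Nat) : Int) = cols - 1 - (j : Int) := by omega
    rw [hc]

theorem pv_flat180 (rows cols : Int) :
    (PySem.List.pyRange 0 rows 1).flatMap (fun i => (PySem.List.pyRange 0 cols 1).map
        (fun j => (rows - 1 - i) * cols + (cols - 1 - j)))
    = ((((PySem.List.pyRange 0 rows 1).map (fun r =>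
        (PySem.List.pyRange 0 cols 1).map (fun c => r * cols + c))).reverse).map List.reverse).flatten := by
  simp only [pv_pyRange0, List.map_map, List.flatMap_map, Function.comp_def]
  rw [pv_reverse_map_range rows.toNat
    (fun r => (List.range cols.toNat).map (fun c : Nat => (r : Int) * cols + (c : Int)))]
  simp only [List.map_map, Function.comp_def, pv_reverse_map_range]
  simp only [List.flatMap_def]
  congr 1
  refine List.map_congr_left fun i hi => List.map_congr_left fun j hj => ?_
  have hi' := List.mem_range.mp hi
  have hj' := List.mem_range.mp hj
  have h1 : ((rows.toNat - 1 - i : Nat) : Int) = rows - 1 - (i : Int) := by omega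
  have h2 : ((cols.toNat - 1 - j : Nat) : Int) = cols - 1 - (j : Int) := by omega
  rw [h1, h2]

-- per-rotation bridges
theorem pv_case90 (rows cols L : Int) :
    (PySem.List.pyRange 0 cols 1).foldl (fun perm i =>
      (PySem.List.pyRange 0 rows 1).foldl (fun perm j =>
        if (rows - 1 - j) * cols + i < L ∧ ((perm.length : Int) < L)
        then perm ++ [(rows - 1 - j) * cols + i] else perm) perm) []
    = pvEmit L (pvZipStar ((PySem.List.pyRange 0 rows 1).map (fun r =>
        (PySem.List.pyRange 0 cols 1).map (fun c => r * cols + c))).reverse) := by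
  have hpos : ∀ x ∈ (PySem.List.pyRange 0 cols 1).flatMap (fun i =>
      (PySem.List.pyRange 0 rows 1).map (fun j => (rows - 1 - j) * cols + i)), 0 ≤ x := by
    intro x hx
    obtain ⟨i, hi, hx⟩ := List.mem_flatMap.mp hx
    obtain ⟨j, hj, rfl⟩ := List.mem_map.mp hx
    rw [PySem.List.mem_pyRange_one] at hi hj
    have := mul_nonneg (by omega : (0:Int) ≤ rows - 1 - j) (by omega : (0:Int) ≤ cols)
    omega
  exact (pv_loops_flat cols rows L _).trans ((pv_guarded_slice L _ hpos).trans
    (congrArg (fun l : List Int =>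
      PySem.List.slice (l.filter (fun p => decide (p < L))) none (some L)) (pv_flat90 rows cols)))

theorem pv_case180 (rows cols L : Int) :
    (PySem.List.pyRange 0 rows 1).foldl (fun perm i =>
      (PySem.List.pyRange 0 cols 1).foldl (fun perm j =>
        if (rows - 1 - i) * cols + (cols - 1 - j) < L ∧ ((perm.length : Int) < L)
        then perm ++ [(rows - 1 - i) * cols + (cols - 1 - j)] else perm) perm) []
    = pvEmit L ((((PySem.List.pyRange 0 rows 1).map (fun r =>
        (PySem.List.pyRange 0 cols 1).map (fun c => r * cols + c))).reverse).map List.reverse) := by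
  have hpos : ∀ x ∈ (PySem.List.pyRange 0 rows 1).flatMap (fun i =>
      (PySem.List.pyRange 0 cols 1).map (fun j => (rows - 1 - i) * cols + (cols - 1 - j))), 0 ≤ x := by
    intro x hx
    obtain ⟨i, hi, hx⟩ := List.mem_flatMap.mp hx
    obtain ⟨j, hj, rfl⟩ := List.mem_map.mp hx
    rw [PySem.List.mem_pyRange_one] at hi hj
    have := mul_nonneg (by omega : (0:Int) ≤ rows - 1 - i) (by omega : (0:Int) ≤ cols)
    omega
  exact (pv_loops_flat rows cols L _).trans ((pv_guarded_slice L _ hpos).trans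
    (congrArg (fun l : List Int =>
      PySem.List.slice (l.filter (fun p => decide (p < L))) none (some L)) (pv_flat180 rows cols)))

theorem pv_case270 (rows cols L : Int) :
    (PySem.List.pyRange 0 cols 1).foldl (fun perm i =>
      (PySem.List.pyRange 0 rows 1).foldl (fun perm j =>
        if j * cols + (cols - 1 - i) < L ∧ ((perm.length : Int) < L)
        then perm ++ [j * cols + (cols - 1 - i)] else perm) perm) []
    = pvEmit L ((pvZipStar ((PySem.List.pyRange 0 rows 1).map (fun r =>
        (PySem.List.pyRange 0 cols 1).map (fun c => r * cols + c)))).reverse) := by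
  have hpos : ∀ x ∈ (PySem.List.pyRange 0 cols 1).flatMap (fun i =>
      (PySem.List.pyRange 0 rows 1).map (fun j => j * cols + (cols - 1 - i))), 0 ≤ x := by
    intro x hx
    obtain ⟨i, hi, hx⟩ := List.mem_flatMap.mp hx
    obtain ⟨j, hj, rfl⟩ := List.mem_map.mp hx
    rw [PySem.List.mem_pyRange_one] at hi hj
    have := mul_nonneg (by omega : (0:Int) ≤ j) (by omega : (0:Int) ≤ cols)
    omega
  exact (pv_loops_flat cols rows L _).trans ((pv_guarded_slice L _ hpos).trans
    (congrArg (fun l : List Int =>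
      PySem.List.slice (l.filter (fun p => decide (p < L))) none (some L)) (pv_flat270 rows cols)))

-- ===== VERDICT (by name: the statement is the Claim_ definition above) =====
theorem grid_rotation_perm_spec : Claim_equal_grid_rotation_perm := by
  intro rows cols length rotation _
  unfold Spec_grid_rotation_perm grid_rotation_perm grid_rotation_perm_alt
  by_cases h90 : rotation = 90
  · rw [if_pos h90, if_pos (Or.inl h90), if_pos h90]
    exact pv_case90 rows cols length
  · rw [if_neg h90]
    by_cases h270 : rotation = 270
    · rw [if_pos h270, if_pos (Or.inr (Or.inr h270)), if_neg h90,
        if_neg (by omega : ¬ rotation = 180)]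
      exact pv_case270 rows cols length
    · rw [if_neg h270]
      by_cases h180 : rotation = 180
      · rw [if_pos h180, if_pos (Or.inr (Or.inl h180)), if_neg h90, if_pos h180]
        exact pv_case180 rows cols length
      · rw [if_neg h180,
          if_neg (by simp [h90, h180, h270] : ¬(rotation = 90 ∨ rotation = 180 ∨ rotation = 270))]
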